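-- pv_equiv track=rewrite | github.com/waynegault/SocialMediaPublisher | source_verifier.py | _is_domain_in_set
-- ===== SOURCE A (Python) =====
-- def _is_domain_in_set(domain: str, domain_set: frozenset[str]) -> bool:
--     """Check if domain or any parent domain is in the set."""
--     # Direct match
--     if domain in domain_set:
--         return True
--
--     # Check parent domains (e.g., news.mit.edu -> mit.edu)
--     parts = domain.split(".")
--     for i in range(1, len(parts) - 1):
--         parent = ".".join(parts[i:])
--         if parent in domain_set:
--             return True
--
--     # Check for subdomain prefix patterns (e.g., "newsroom." matches "newsroom.company.com")
--     # These patterns must appear at the START of the domain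
--     for pattern in domain_set:
--         if pattern.endswith(".") and domain.startswith(pattern):
--             return True
--
--     return False
-- ===== SOURCE B (Python) =====
-- def _is_domain_in_set(domain: str, domain_set: frozenset[str]) -> bool:
--     """Check if domain or any parent domain is in the set."""
--     # Direct match
--     if domain in domain_set:
--         return True
--
--     # Parent domains are exactly the suffixes starting right after a dot,
--     # except the one after the last dot (the bare TLD is not checked).
--     dots = [i for i, c in enumerate(domain) if c == "."]
--     for p in dots[:-1]:
--         if domain[p + 1:] in domain_set:
--             return True
--
--     # A '.'-terminated prefix pattern matches iff it is domain[:p+1] for some dot p: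
--     # enumerate the domain's own '.'-terminated prefixes and look them up directly.
--     for p in dots:
--         if domain[:p + 1] in domain_set:
--             return True
--
--     return False
-- ===== Notes on version B (the rewrite author's own statement) =====
-- stated objective: alternative
-- what changed: Instead of splitting/joining parts for parents and scanning every set pattern for '.'-terminated prefixes, B computes the domain's dot positions once and tests only the domain's own dot-suffixes and dot-prefixes by direct set membership; same cost, set-scan removed.
import Mathlib
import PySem

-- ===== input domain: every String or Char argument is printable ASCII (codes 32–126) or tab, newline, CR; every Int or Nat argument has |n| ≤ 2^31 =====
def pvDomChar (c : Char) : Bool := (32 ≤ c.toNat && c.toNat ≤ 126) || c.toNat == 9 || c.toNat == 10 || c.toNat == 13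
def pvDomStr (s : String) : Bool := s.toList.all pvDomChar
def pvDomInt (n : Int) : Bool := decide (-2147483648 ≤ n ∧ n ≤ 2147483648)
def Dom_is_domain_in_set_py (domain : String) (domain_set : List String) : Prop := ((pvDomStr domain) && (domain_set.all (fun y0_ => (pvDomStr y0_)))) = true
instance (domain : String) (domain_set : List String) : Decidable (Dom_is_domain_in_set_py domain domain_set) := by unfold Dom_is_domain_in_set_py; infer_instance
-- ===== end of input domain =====

-- B replaces the scan over every set pattern (and the split/join parent walk) by
-- enumerating the domain's own dot positions once and testing the induced suffixes and
-- prefixes by direct set membership (an alternative algorithm of similar cost).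


-- ===== PORT A =====
def is_domain_in_set_py (domain : String) (domain_set : List String) : Bool :=
  -- if domain in domain_set: return True
  if domain_set.contains domain then true
  else
    -- parts = domain.split(".")
    let parts := (PySem.Str.split? domain ".").getD []
    -- for i in range(1, len(parts) - 1): if ".".join(parts[i:]) in domain_set: return True
    if (PySem.List.pyRange 1 ((parts.length : Int) - 1) 1).any (fun i =>
        domain_set.contains (PySem.Str.join "." (PySem.List.slice parts (some i) none))) then true
    else
      -- for pattern in domain_set: if pattern.endswith(".") and domain.startswith(pattern): return True
      domain_set.any (fun pattern =>
        PySem.Str.endswith pattern "." && PySem.Str.startswith domain pattern)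

-- ===== PORT B =====
def is_domain_in_set_py_alt (domain : String) (domain_set : List String) : Bool :=
  if domain_set.contains domain then true
  else
    -- dots = [i for i, c in enumerate(domain) if c == "."]
    let dots := (PySem.List.enumerate domain.toList).filterMap
        (fun ic => if ic.2 = '.' then some ic.1 else none)
    -- for p in dots[:-1]: if domain[p+1:] in domain_set: return True
    if (PySem.List.slice dots none (some (-1))).any (fun p =>
        domain_set.contains (PySem.Str.slice domain (some (p + 1)) none)) then true
    else
      -- for p in dots: if domain[:p+1] in domain_set: return True
      dots.any (fun p => domain_set.contains (PySem.Str.slice domain none (some (p + 1))))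

-- ===== PRECONDITION & SPEC =====
def Spec_is_domain_in_set_py (domain : String) (domain_set : List String) (out : Bool) : Prop := out = is_domain_in_set_py_alt domain domain_set
instance (domain : String) (domain_set : List String) (out : Bool) : Decidable (Spec_is_domain_in_set_py domain domain_set out) := by unfold Spec_is_domain_in_set_py; infer_instance

-- ===== CLAIM (what is proved, stated in full; the proofs are below) =====
def Claim_equal_is_domain_in_set_py : Prop := ∀ (domain : String) (domain_set : List String), Dom_is_domain_in_set_py domain domain_set → Spec_is_domain_in_set_py domain domain_set (is_domain_in_set_py domain domain_set)

-- ===== LEMMAS AND PROOFS =====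

def mySplit : List Char → List (List Char)
  | [] => [[]]
  | c :: cs => if c = '.' then [] :: mySplit cs else (mySplit cs).modifyHead (c :: ·)
def dotsOf : List Char → List Nat
  | [] => []
  | c :: cs => if c = '.' then 0 :: (dotsOf cs).map (· + 1) else (dotsOf cs).map (· + 1)

theorem mySplit_ne_nil (cs : List Char) : mySplit cs ≠ [] := by
  induction cs with
  | nil => simp [mySplit]
  | cons c cs ih =>
    simp only [mySplit]
    split
    · simp
    · cases hm : mySplit cs with
      | nil => exact absurd hm ih
      | cons a t => simp

theorem splitOn_go_eq (l : List Char) : ∀ (fuel : Nat) (cur : List Char) (acc : List (List Char)),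
    l.length < fuel →
    PySem.Chars.splitOn.go ['.'] fuel l cur acc = acc.reverse ++ (mySplit l).modifyHead (cur.reverse ++ ·) := by
  induction l with
  | nil =>
    intro fuel cur acc h
    cases fuel with
    | zero => omega
    | succ f => simp [PySem.Chars.splitOn.go, mySplit]
  | cons c cs ih =>
    intro fuel cur acc h
    cases fuel with
    | zero => omega
    | succ f =>
      by_cases hc : c = '.'
      · subst hc
        have hpre : List.isPrefixOf ['.'] ('.' :: cs) = true := by simp [List.isPrefixOf]
        rw [PySem.Chars.splitOn.go]
        simp only [hpre, if_pos, List.length_cons, List.length_nil, List.drop_succ_cons, List.drop_zero]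
        rw [ih f [] (cur.reverse :: acc) (by simpa using Nat.lt_of_succ_lt_succ h)]
        cases hm : mySplit cs <;> simp [mySplit, hm]
      · have hpre : List.isPrefixOf ['.'] (c :: cs) = false := by
          simp [List.isPrefixOf]
          intro h'; exact absurd h'.symm hc
        rw [PySem.Chars.splitOn.go]
        simp only [hpre, Bool.false_eq_true, if_false]
        rw [ih f (c :: cur) acc (by simpa using Nat.lt_of_succ_lt_succ h)]
        cases hm : mySplit cs with
        | nil => exact absurd hm (mySplit_ne_nil cs)
        | cons a t => simp [mySplit, hc, hm]

theorem splitOn_eq (cs : List Char) : PySem.Chars.splitOn cs ['.'] = mySplit cs := by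
  rw [PySem.Chars.splitOn, splitOn_go_eq cs (cs.length + 1) [] [] (by omega)]
  cases hm : mySplit cs with
  | nil => exact absurd hm (mySplit_ne_nil cs)
  | cons a t => simp

theorem length_mySplit (cs : List Char) : (mySplit cs).length = (dotsOf cs).length + 1 := by
  induction cs with
  | nil => simp [mySplit, dotsOf]
  | cons c cs ih =>
    by_cases hc : c = '.' <;> simp [mySplit, dotsOf, hc, ih]

theorem mySplit_dot (cs : List Char) : mySplit ('.' :: cs) = [] :: mySplit cs := by
  simp [mySplit]

theorem mySplit_nodot {c : Char} (hc : ¬ c = '.') (cs : List Char) :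
    mySplit (c :: cs) = (mySplit cs).modifyHead (c :: ·) := by
  simp [mySplit, hc]

theorem dotsOf_dot (cs : List Char) : dotsOf ('.' :: cs) = 0 :: (dotsOf cs).map (· + 1) := by
  simp [dotsOf]

theorem dotsOf_nodot {c : Char} (hc : ¬ c = '.') (cs : List Char) :
    dotsOf (c :: cs) = (dotsOf cs).map (· + 1) := by
  simp [dotsOf, hc]

theorem join_mySplit (cs : List Char) : PySem.Chars.join ['.'] (mySplit cs) = cs := by
  induction cs with
  | nil => simp [mySplit, PySem.Chars.join_singleton]
  | cons c cs ih =>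
    cases hm : mySplit cs with
    | nil => exact absurd hm (mySplit_ne_nil cs)
    | cons a t =>
      by_cases hc : c = '.'
      · subst hc
        rw [mySplit_dot, hm, PySem.Chars.join_cons_cons, ← hm, ih]
        simp
      · rw [mySplit_nodot hc, hm]
        simp only [List.modifyHead_cons]
        cases t with
        | nil =>
          rw [hm] at ih
          rw [PySem.Chars.join_singleton] at ih ⊢
          rw [ih]
        | cons b t' =>
          rw [hm, PySem.Chars.join_cons_cons] at ih
          rw [PySem.Chars.join_cons_cons]
          simp only [List.cons_append, List.append_assoc] at ih ⊢
          rw [ih]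

theorem join_drop_mySplit (cs : List Char) : ∀ (k : Nat) (h : k < (dotsOf cs).length),
    PySem.Chars.join ['.'] ((mySplit cs).drop (k + 1)) = cs.drop ((dotsOf cs)[k] + 1) := by
  induction cs with
  | nil => intro k h; simp [dotsOf] at h
  | cons c cs ih =>
    intro k h
    by_cases hc : c = '.'
    · subst hc
      cases k with
      | zero =>
        simp only [mySplit_dot, dotsOf_dot, List.drop_succ_cons, List.drop_zero,
          List.getElem_cons_zero]
        rw [join_mySplit]
      | succ k =>
        have hk : k < (dotsOf cs).length := by
          rw [dotsOf_dot] at h; simpa using Nat.lt_of_succ_lt_succ h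
        simp only [mySplit_dot, dotsOf_dot, List.drop_succ_cons, List.getElem_cons_succ,
          List.getElem_map]
        rw [ih k hk]
    · have hk : k < (dotsOf cs).length := by rw [dotsOf_nodot hc] at h; simpa using h
      simp only [mySplit_nodot hc, dotsOf_nodot hc, List.getElem_map]
      have hd : ((mySplit cs).modifyHead (c :: ·)).drop (k + 1) = (mySplit cs).drop (k + 1) := by
        cases hm : mySplit cs with
        | nil => exact absurd hm (mySplit_ne_nil cs)
        | cons a t => simp
      rw [hd, ih k hk]
      simp

theorem mem_dotsOf (cs : List Char) (p : Nat) : p ∈ dotsOf cs ↔ cs[p]? = some '.' := by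
  induction cs generalizing p with
  | nil => simp [dotsOf]
  | cons c cs ih =>
    by_cases hc : c = '.'
    · subst hc
      cases p with
      | zero => simp [dotsOf]
      | succ p => simp [dotsOf, ih]
    · cases p with
      | zero => simp [dotsOf, hc]
      | succ p => simp [dotsOf, hc, ih]

theorem enumerate_filter_dots (cs : List Char) : ∀ (s : Int),
    (PySem.List.enumerate cs s).filterMap (fun ic => if ic.2 = '.' then some ic.1 else none)
      = (dotsOf cs).map (fun (p : Nat) => ((p : Int) + s)) := by
  induction cs with
  | nil =>
    intro s
    rw [show PySem.List.enumerate ([] : List Char) s = [] from rfl]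
    simp [dotsOf]
  | cons c cs ih =>
    intro s
    rw [show PySem.List.enumerate (c :: cs) s = (s, c) :: PySem.List.enumerate cs (s + 1) from rfl,
        List.filterMap_cons]
    by_cases hc : c = '.'
    · subst hc
      rw [if_pos rfl, ih (s + 1), dotsOf_dot]
      simp only [List.map_cons, List.map_map, Nat.cast_zero, zero_add]
      congr 1
      apply List.map_congr_left
      intro p _
      simp only [Function.comp_apply]
      push_cast
      ring
    · rw [if_neg hc, ih (s + 1), dotsOf_nodot hc]
      simp only [List.map_map]
      apply List.map_congr_left
      intro p _
      simp only [Function.comp_apply]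
      push_cast
      ring

theorem parts_toList (domain : String) :
    ((PySem.Str.split? domain ".").getD []).map String.toList = mySplit domain.toList := by
  have h := PySem.Str.split?_map domain "."
  rw [show (".": String).toList = ['.'] from rfl] at h
  rw [show PySem.Chars.split? domain.toList ['.']
        = some (PySem.Chars.splitOn domain.toList ['.']) from by simp [PySem.Chars.split?]] at h
  cases hs : PySem.Str.split? domain "." with
  | none => rw [hs] at h; simp at h
  | some l =>
    rw [hs] at h
    simp only [Option.map_some, Option.some.injEq] at h
    simp [h, splitOn_eq]

theorem parts_length (domain : String) :
    ((PySem.Str.split? domain ".").getD []).length = (dotsOf domain.toList).length + 1 := by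
  have h := congrArg List.length (parts_toList domain)
  simpa [length_mySplit] using h

theorem joinA_eq (domain : String) (k : Nat) (hk : k < (dotsOf domain.toList).length) :
    PySem.Str.join "." (PySem.List.slice ((PySem.Str.split? domain ".").getD []) (some ((k : Int) + 1)) none)
      = String.ofList (domain.toList.drop ((dotsOf domain.toList)[k] + 1)) := by
  apply String.toList_inj.mp
  rw [PySem.Str.toList_join]
  rw [show ((k : Int) + 1) = ((k + 1 : Nat) : Int) from by push_cast; ring]
  rw [PySem.List.slice_from_natCast]
  rw [List.map_drop, parts_toList]
  conv_rhs => rw [String.toList_ofList]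
  exact join_drop_mySplit domain.toList k hk

theorem sliceB_from_eq (domain : String) (q : Nat) :
    PySem.Str.slice domain (some ((q : Int) + 1)) none = String.ofList (domain.toList.drop (q + 1)) := by
  rw [PySem.Str.slice, PySem.Chars.slice_eq_listSlice]
  rw [show ((q : Int) + 1) = ((q + 1 : Nat) : Int) from by push_cast; ring]
  rw [PySem.List.slice_from_natCast]

theorem sliceB_to_eq (domain : String) (q : Nat) :
    PySem.Str.slice domain none (some ((q : Int) + 1)) = String.ofList (domain.toList.take (q + 1)) := by
  rw [PySem.Str.slice, PySem.Chars.slice_eq_listSlice]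
  rw [show ((q : Int) + 1) = ((q + 1 : Nat) : Int) from by push_cast; ring]
  rw [PySem.List.slice_to_natCast]

theorem dotsB_eq (domain : String) :
    (PySem.List.enumerate domain.toList).filterMap (fun ic => if ic.2 = '.' then some ic.1 else none)
      = (dotsOf domain.toList).map (fun (p : Nat) => (p : Int)) := by
  rw [show PySem.List.enumerate domain.toList = PySem.List.enumerate domain.toList 0 from rfl]
  rw [enumerate_filter_dots domain.toList 0]
  simp

theorem parent_any_eq (domain : String) (domain_set : List String) :
    (PySem.List.pyRange 1 ((((PySem.Str.split? domain ".").getD []).length : Int) - 1) 1).any (fun i =>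
        domain_set.contains (PySem.Str.join "." (PySem.List.slice ((PySem.Str.split? domain ".").getD []) (some i) none)))
    = (PySem.List.slice ((dotsOf domain.toList).map (fun (p : Nat) => (p : Int))) none (some (-1))).any (fun p =>
        domain_set.contains (PySem.Str.slice domain (some (p + 1)) none)) := by
  apply Bool.coe_iff_coe.mp
  rw [PySem.List.slice_to_neg_one, ← List.map_dropLast]
  simp only [List.any_eq_true, List.mem_map]
  constructor
  · rintro ⟨i, hir, hc⟩
    rw [PySem.List.mem_pyRange_one] at hir
    rw [parts_length] at hir
    have h1 : 1 ≤ i := hir.1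
    have h2 : i < ((dotsOf domain.toList).length : Int) := by push_cast at hir ⊢; omega
    obtain ⟨k, hk⟩ : ∃ k : Nat, i = (k : Int) + 1 := ⟨(i - 1).toNat, by omega⟩
    have hkD : k < (dotsOf domain.toList).length := by omega
    have hkD' : k < (dotsOf domain.toList).dropLast.length := by rw [List.length_dropLast]; omega
    subst hk
    rw [joinA_eq domain k hkD] at hc
    refine ⟨(dotsOf domain.toList).dropLast[k], ⟨(dotsOf domain.toList).dropLast[k], List.getElem_mem hkD', rfl⟩, ?_⟩
    rw [List.getElem_dropLast]
    rw [sliceB_from_eq]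
    exact hc
  · rintro ⟨p, ⟨q, hq, rfl⟩, hc⟩
    obtain ⟨k, hkD', hkq⟩ := List.mem_iff_getElem.mp hq
    have hlen : (dotsOf domain.toList).dropLast.length = (dotsOf domain.toList).length - 1 := List.length_dropLast
    have hkD : k < (dotsOf domain.toList).length := by omega
    refine ⟨(k : Int) + 1, ?_, ?_⟩
    · rw [PySem.List.mem_pyRange_one, parts_length]
      push_cast
      omega
    · rw [joinA_eq domain k hkD]
      rw [sliceB_from_eq] at hc
      rw [← hkq, List.getElem_dropLast] at hc
      exact hc

theorem prefix_any_eq (domain : String) (domain_set : List String) :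
    (domain_set.any (fun pattern => PySem.Str.endswith pattern "." && PySem.Str.startswith domain pattern))
    = ((dotsOf domain.toList).map (fun (p : Nat) => (p : Int))).any (fun p =>
        domain_set.contains (PySem.Str.slice domain none (some (p + 1)))) := by
  apply Bool.coe_iff_coe.mp
  simp only [List.any_eq_true, List.mem_map, Bool.and_eq_true]
  constructor
  · rintro ⟨pat, hmem, hend, hstart⟩
    rw [PySem.Str.endswith_eq, PySem.Chars.endswith_iff] at hend
    rw [PySem.Str.startswith_eq, PySem.Chars.startswith_iff] at hstart
    obtain ⟨pre, hpre⟩ := hend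
    have hlen : pat.toList.length = pre.length + 1 := by rw [← hpre]; simp
    have hle : pat.toList.length ≤ domain.toList.length := hstart.length_le
    have htake : pat.toList = domain.toList.take (pre.length + 1) := by
      rw [← hlen]; exact List.prefix_iff_eq_take.mp hstart
    have hpat : pat.toList[pre.length]? = some '.' := by rw [← hpre]; simp
    have hdom : domain.toList[pre.length]? = some '.' := by
      rw [htake] at hpat
      rwa [List.getElem?_take_of_lt (by omega)] at hpat
    refine ⟨(pre.length : Int), ⟨pre.length, ?_, rfl⟩, ?_⟩
    · rw [mem_dotsOf]
      exact hdom
    · rw [sliceB_to_eq, ← htake, String.ofList_toList]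
      exact List.contains_iff_mem.mpr hmem
  · rintro ⟨p, ⟨q, hq, rfl⟩, hc⟩
    rw [mem_dotsOf] at hq
    rw [sliceB_to_eq] at hc
    refine ⟨String.ofList (domain.toList.take (q + 1)), List.contains_iff_mem.mp hc, ?_, ?_⟩
    · rw [PySem.Str.endswith_eq, PySem.Chars.endswith_iff, String.toList_ofList]
      refine ⟨domain.toList.take q, ?_⟩
      rw [String.toList_ofList, List.take_add_one, hq]
      rfl
    · rw [PySem.Str.startswith_eq, PySem.Chars.startswith_iff, String.toList_ofList]
      exact List.take_prefix _ _


-- ===== VERDICT (by name: the statement is the Claim_ definition above) =====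
theorem is_domain_in_set_py_spec : Claim_equal_is_domain_in_set_py := by
  intro domain domain_set _
  unfold Spec_is_domain_in_set_py is_domain_in_set_py is_domain_in_set_py_alt
  by_cases hdir : domain_set.contains domain
  · simp only [hdir, if_true]
  · simp only [hdir, Bool.false_eq_true, if_false]
    rw [dotsB_eq, parent_any_eq, prefix_any_eq]
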